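-- pv_equiv track=rewrite | github.com/ChrisW-priv/poker_analysis | poker_analysis.py | _check_if_same_suite_in_cards
-- ===== SOURCE A (Python) =====
-- def _check_if_same_suite_in_cards(cards7):
-- 	colors = [col for _, col in cards7]
-- 	set_of_colors = set(colors)
-- 	for color in set_of_colors:
-- 		count = colors.count(color)
-- 		if count >= 5:
-- 			nums = (num for num, col in cards7 if col == color)
-- 			max_of_nums = max(nums)
-- 			return max_of_nums
-- ===== SOURCE B (Python) =====
-- def _check_if_same_suite_in_cards(cards7):
-- 	s = sorted(cards7, key=lambda card: card[1])
-- 	i = 0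
-- 	while i < len(s):
-- 		j = i
-- 		while j < len(s) and s[j][1] == s[i][1]:
-- 			j += 1
-- 		if j - i >= 5:
-- 			return max(num for num, _ in s[i:j])
-- 		i = j
-- ===== Notes on version B (the rewrite author's own statement) =====
-- stated objective: alternative
-- what changed: B sorts the cards by suit once and scans the sorted list for a run of >=5 equal suits, taking the max rank of that run, instead of A's iteration over the set of suits with a colors.count scan and a separate filtered max pass per suit.
import Mathlib
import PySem

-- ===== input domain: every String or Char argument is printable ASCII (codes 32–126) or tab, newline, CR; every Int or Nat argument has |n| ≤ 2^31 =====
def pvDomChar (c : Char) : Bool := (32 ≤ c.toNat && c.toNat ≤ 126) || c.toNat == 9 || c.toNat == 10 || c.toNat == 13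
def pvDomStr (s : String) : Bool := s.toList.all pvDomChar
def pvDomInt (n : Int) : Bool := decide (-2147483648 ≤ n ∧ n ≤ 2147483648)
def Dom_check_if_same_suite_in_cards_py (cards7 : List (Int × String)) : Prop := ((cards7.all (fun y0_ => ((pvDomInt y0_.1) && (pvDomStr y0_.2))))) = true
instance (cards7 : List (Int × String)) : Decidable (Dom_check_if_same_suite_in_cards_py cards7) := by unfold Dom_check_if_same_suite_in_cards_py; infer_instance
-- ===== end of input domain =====

-- B sorts the cards by suit once and scans the sorted list for a run of ≥5 equal suits,
-- instead of A's per-suit colors.count scan over the set of suits plus a separate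
-- filtered max pass (objective: alternative, sort-then-scan).

-- ===== PORT A =====
-- the 'for color in set_of_colors' loop with early return
def pvALoop (cards7 : List (Int × String)) (colors : List String) : List String → Option Int
  | [] => none
  | color :: rest =>
    if 5 ≤ PySem.List.count colors color then
      PySem.List.max? ((cards7.filter (fun p => p.2 == color)).map (·.1)) (fun x => x)
    else pvALoop cards7 colors rest

def check_if_same_suite_in_cards_py (cards7 : List (Int × String)) : Option Int :=
  let colors : List String := cards7.map (·.2)
  let set_of_colors : PySem.Set String := PySem.Set.ofList colors
  pvALoop cards7 colors set_of_colors

-- ===== PORT B =====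
-- the outer 'while i < len(s)' loop: the inner while finds the run end (takeWhile),
-- s[i:j] is the run; 'i = j' advances past the run (dropWhile)
def pvRunScan : List (Int × String) → Option Int
  | [] => none
  | (num, col) :: t =>
    let run := (num, col) :: t.takeWhile (fun p => p.2 == col)
    if 5 ≤ run.length then PySem.List.max? (run.map (·.1)) (fun x => x)
    else pvRunScan (t.dropWhile (fun p => p.2 == col))
termination_by s => s.length
decreasing_by
  simp only [List.length_cons]
  exact Nat.lt_succ_of_le (List.length_dropWhile_le _ _)

def check_if_same_suite_in_cards_py_alt (cards7 : List (Int × String)) : Option Int :=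
  pvRunScan (PySem.List.sorted cards7 (fun card => card.2))

-- ===== PRECONDITION & SPEC =====
-- Pre_ excludes inputs where TWO distinct suits each occur ≥ 5 times: there A's answer is
-- picked by Python's hash-dependent set-iteration order, an accident no port can fix.
def Pre_check_if_same_suite_in_cards_py (cards7 : List (Int × String)) : Prop :=
  ∀ c1 ∈ cards7.map (·.2), ∀ c2 ∈ cards7.map (·.2),
    5 ≤ (cards7.map (·.2)).count c1 → 5 ≤ (cards7.map (·.2)).count c2 → c1 = c2
instance (cards7 : List (Int × String)) : Decidable (Pre_check_if_same_suite_in_cards_py cards7) := by unfold Pre_check_if_same_suite_in_cards_py; infer_instance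

def pvWitness_check_if_same_suite_in_cards_py : (List (Int × String)) :=
  [(1,"h"),(2,"h"),(3,"h"),(4,"h"),(5,"h"),(6,"s"),(7,"s")]

def Spec_check_if_same_suite_in_cards_py (cards7 : List (Int × String)) (out : Option Int) : Prop := out = check_if_same_suite_in_cards_py_alt cards7
instance (cards7 : List (Int × String)) (out : Option Int) : Decidable (Spec_check_if_same_suite_in_cards_py cards7 out) := by unfold Spec_check_if_same_suite_in_cards_py; infer_instance

-- ===== CLAIM (what is proved, stated in full; the proofs are below) =====
def Claim_equal_check_if_same_suite_in_cards_py : Prop := ∀ (cards7 : List (Int × String)), Dom_check_if_same_suite_in_cards_py cards7 → Pre_check_if_same_suite_in_cards_py cards7 → Spec_check_if_same_suite_in_cards_py cards7 (check_if_same_suite_in_cards_py cards7)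

-- ===== LEMMAS AND PROOFS =====

-- both loops are 'find the first qualifying suit in a key list, return max of its ranks'
def pvQualMax (cards : List (Int × String)) : List String → Option Int
  | [] => none
  | c :: rest =>
    if 5 ≤ (cards.map (·.2)).count c then
      PySem.List.max? ((cards.filter (fun p => p.2 == c)).map (·.1)) (fun x => x)
    else pvQualMax cards rest

-- the rank group of a suit has as many elements as the suit occurs among the colors
theorem pv_filter_length (cards : List (Int × String)) (c : String) :
    (cards.filter (fun p => p.2 == c)).length = (cards.map (·.2)).count c := by
  induction cards with
  | nil => rfl
  | cons p t ih => by_cases h : p.2 = c <;> simp [h, ih]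

theorem pv_aloop_eq (cards : List (Int × String)) (ks : List String) :
    pvALoop cards (cards.map (·.2)) ks = pvQualMax cards ks := by
  induction ks with
  | nil => rfl
  | cons c rest ih => simp only [pvALoop, pvQualMax, PySem.List.count_eq, ih]

-- max(xs) (no key) only depends on the multiset of xs
theorem pv_max?_perm {l l' : List Int} (h : l.Perm l') :
    PySem.List.max? l (fun x => x) = PySem.List.max? l' (fun x => x) := by
  rcases hl : PySem.List.max? l (fun x => x) with _ | m
  · rw [PySem.List.max?_eq_none_iff] at hl
    subst hl
    rw [List.nil_perm] at h
    subst h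
    rfl
  · rcases hl' : PySem.List.max? l' (fun x => x) with _ | m'
    · rw [PySem.List.max?_eq_none_iff] at hl'
      subst hl'
      rw [List.perm_nil] at h
      simp [h, PySem.List.max?] at hl
    · have hm := PySem.List.max?_mem hl
      have hm' := PySem.List.max?_mem hl'
      have h1 := PySem.List.max?_isMax hl m' (h.mem_iff.mpr hm')
      have h2 := PySem.List.max?_isMax hl' m (h.mem_iff.mp hm)
      simp only [Option.some.injEq]
      omega

-- skipping non-qualifying keys
theorem pv_qualMax_skip (cards : List (Int × String)) (ks1 ks : List String)
    (h : ∀ c ∈ ks1, ¬ 5 ≤ (cards.map (·.2)).count c) :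
    pvQualMax cards (ks1 ++ ks) = pvQualMax cards ks := by
  induction ks1 with
  | nil => rfl
  | cons c t ih =>
    simp only [List.cons_append, pvQualMax, if_neg (h c (by simp))]
    exact ih (fun x hx => h x (by simp [hx]))

-- keys whose per-suit card groups agree in two card lists yield the same scan
theorem pv_qualMax_congr (s rest : List (Int × String)) (ks : List String)
    (h : ∀ c ∈ ks, s.filter (fun p => p.2 == c) = rest.filter (fun p => p.2 == c)) :
    pvQualMax s ks = pvQualMax rest ks := by
  induction ks with
  | nil => rfl
  | cons c t ih =>
    have hc := h c (by simp)
    have hcount : (s.map (·.2)).count c = (rest.map (·.2)).count c := by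
      rw [← pv_filter_length, ← pv_filter_length, hc]
    simp only [pvQualMax, hcount, hc, ih (fun x hx => h x (by simp [hx]))]

-- in a suit-sorted list, everything after the head's run has a strictly larger suit
theorem pv_dropWhile_ne (col : String) (t : List (Int × String))
    (hp : t.Pairwise (fun a b => a.2 ≤ b.2)) (hge : ∀ x ∈ t, col ≤ x.2) :
    ∀ x ∈ t.dropWhile (fun p => p.2 == col), x.2 ≠ col := by
  induction t with
  | nil => simp
  | cons p t ih =>
    rw [List.pairwise_cons] at hp
    by_cases h : p.2 = col
    · rw [List.dropWhile_cons_of_pos (by simp [h])]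
      exact ih hp.2 (fun x hx => hge x (by simp [hx]))
    · rw [List.dropWhile_cons_of_neg (by simp [h])]
      intro x hx
      rcases List.mem_cons.mp hx with rfl | hx'
      · exact h
      · have h1 : col ≤ p.2 := hge p (by simp)
        have h2 : p.2 ≤ x.2 := hp.1 x hx'
        intro hcol
        exact h (le_antisymm (hcol ▸ h2) h1)

-- the head run of a suit-sorted list is exactly the head suit's card group
theorem pv_run_eq_filter (num : Int) (col : String) (t : List (Int × String))
    (hp : ((num, col) :: t).Pairwise (fun a b => a.2 ≤ b.2)) :
    (num, col) :: t.takeWhile (fun p => p.2 == col)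
      = ((num, col) :: t).filter (fun p => p.2 == col) := by
  rw [List.pairwise_cons] at hp
  have hne := pv_dropWhile_ne col t hp.2 hp.1
  rw [List.filter_cons_of_pos (by simp)]
  congr 1
  conv_rhs => rw [← List.takeWhile_append_dropWhile (p := fun p => p.2 == col) (l := t)]
  rw [List.filter_append,
      List.filter_eq_self.mpr (fun x hx => List.mem_takeWhile_imp (p := fun p => p.2 == col) (l := t) hx),
      List.filter_eq_nil_iff.mpr (fun x hx => by simpa using hne x hx),
      List.append_nil]

-- the run scan over a suit-sorted list is the first-qualifying-suit scan
theorem pv_runScan_eq (s : List (Int × String))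
    (hp : s.Pairwise (fun a b => a.2 ≤ b.2)) :
    pvRunScan s = pvQualMax s (s.map (·.2)) := by
  induction hn : s.length using Nat.strong_induction_on generalizing s with
  | _ n ih =>
    match s, hp with
    | [], _ => simp [pvRunScan, pvQualMax]
    | (num, col) :: t, hp =>
      have hpc := List.pairwise_cons.mp hp
      have hne := pv_dropWhile_ne col t hpc.2 hpc.1
      have hrun := pv_run_eq_filter num col t hp
      have hlen : ((num, col) :: t.takeWhile (fun p => p.2 == col)).length
          = (((num, col) :: t).map (·.2)).count col := by
        rw [hrun, pv_filter_length]
      simp only [pvRunScan]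
      rw [show ((num, col) :: t).map (fun x => x.2) = col :: t.map (fun x => x.2) from rfl]
      simp only [pvQualMax]
      rw [hlen]
      split
      · rw [hrun]
      · next hnq =>
        have hsub : (t.dropWhile (fun p => p.2 == col)).Sublist t := List.dropWhile_sublist _
        have hrlen : (t.dropWhile (fun p => p.2 == col)).length < n := by
          subst hn
          simp only [List.length_cons]
          exact Nat.lt_succ_of_le (hsub.length_le)
        rw [ih _ hrlen _ (hpc.2.sublist hsub) rfl]
        have ht : t = t.takeWhile (fun p => p.2 == col) ++ t.dropWhile (fun p => p.2 == col) :=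
          (List.takeWhile_append_dropWhile).symm
        conv_rhs =>
          rw [show t.map (fun x => x.2)
                = (t.takeWhile (fun p => p.2 == col)).map (fun x => x.2)
                  ++ (t.dropWhile (fun p => p.2 == col)).map (fun x => x.2) from by
              rw [← List.map_append, List.takeWhile_append_dropWhile]]
        rw [pv_qualMax_skip]
        · -- the suits of the tail runs see the same per-suit groups in s and in the tail
          refine (pv_qualMax_congr ((num, col) :: t) (t.dropWhile (fun p => p.2 == col)) _ ?_).symm
          intro c hc
          obtain ⟨x, hx, rfl⟩ := List.mem_map.mp hc
          have hcne : x.2 ≠ col := hne x hx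
          rw [List.filter_cons_of_neg (by simpa using fun h => hcne h.symm)]
          conv_lhs => rw [ht]
          rw [List.filter_append,
            List.filter_eq_nil_iff.mpr (fun y hy => by
              have hyc := List.mem_takeWhile_imp (p := fun p => p.2 == col) (l := t) hy
              simp only [beq_iff_eq] at hyc ⊢
              intro hyx; exact hcne (hyx ▸ hyc)),
            List.nil_append]
        · -- every suit in the head run fails the count test
          intro c hc
          obtain ⟨x, hx, rfl⟩ := List.mem_map.mp hc
          have hxc : x.2 = col := by
            simpa using List.mem_takeWhile_imp (p := fun p => p.2 == col) (l := t) hx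
          rw [hxc]
          exact hnq

-- first-qualifying-suit scan as a find?
theorem pv_qualMax_find (cards : List (Int × String)) (ks : List String) :
    pvQualMax cards ks =
      match ks.find? (fun c => 5 ≤ (cards.map (·.2)).count c) with
      | some c => PySem.List.max? ((cards.filter (fun p => p.2 == c)).map (·.1)) (fun x => x)
      | none => none := by
  induction ks with
  | nil => rfl
  | cons c t ih =>
    by_cases h : 5 ≤ (cards.map (·.2)).count c
    · rw [pvQualMax, if_pos h, List.find?_cons_of_pos (by simpa using h)]
    · rw [pvQualMax, if_neg h, List.find?_cons_of_neg (by simpa using h), ih]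

-- ===== VERDICT (by name: the statement is the Claim_ definition above) =====
theorem check_if_same_suite_in_cards_py_spec : Claim_equal_check_if_same_suite_in_cards_py := by
  intro cards7 _ hpre
  unfold Spec_check_if_same_suite_in_cards_py
  unfold check_if_same_suite_in_cards_py check_if_same_suite_in_cards_py_alt
  set s := PySem.List.sorted cards7 (fun card => card.2) with hs
  have hperm : s.Perm cards7 := PySem.List.sorted_perm cards7 _ false
  have hpermc : (s.map (·.2)).Perm (cards7.map (·.2)) := hperm.map _
  rw [pv_aloop_eq, pv_runScan_eq s (PySem.List.sorted_pairwise cards7 _),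
      pv_qualMax_find, pv_qualMax_find]
  have hqeq : ∀ c, (s.map (fun x => x.2)).count c = (cards7.map (fun x => x.2)).count c :=
    fun c => hpermc.count_eq c
  have hfind : ∀ c, (s.map (fun x => x.2)).find? (fun c => 5 ≤ (s.map (fun x => x.2)).count c) = some c →
      ∃ c', (PySem.Set.ofList (cards7.map (fun x => x.2))).find?
          (fun c => 5 ≤ (cards7.map (fun x => x.2)).count c) = some c' ∧ c = c' := by
    intro c hc
    have hqc : 5 ≤ (cards7.map (fun x => x.2)).count c := by
      have := List.find?_some hc
      rw [hqeq c] at this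
      simpa using this
    have hmemc : c ∈ cards7.map (fun x => x.2) := hpermc.mem_iff.mp (List.mem_of_find?_eq_some hc)
    rcases hsf : (PySem.Set.ofList (cards7.map (fun x => x.2))).find?
        (fun c => 5 ≤ (cards7.map (fun x => x.2)).count c) with _ | c'
    · exfalso
      have := List.find?_eq_none.mp hsf c ((PySem.Set.mem_ofList _ _).mpr hmemc)
      simp [hqc] at this
    · refine ⟨c', hsf, ?_⟩
      have hqc' : 5 ≤ (cards7.map (fun x => x.2)).count c' := by simpa using List.find?_some hsf
      have hmemc' : c' ∈ cards7.map (fun x => x.2) :=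
        (PySem.Set.mem_ofList _ _).mp (List.mem_of_find?_eq_some hsf)
      exact hpre c hmemc c' hmemc' hqc hqc'
  rcases hb : (s.map (fun x => x.2)).find? (fun c => 5 ≤ (s.map (fun x => x.2)).count c) with _ | c
  · rcases ha : (PySem.Set.ofList (cards7.map (fun x => x.2))).find?
        (fun c => 5 ≤ (cards7.map (fun x => x.2)).count c) with _ | c'
    · rw [hb, ha]
    · exfalso
      have hqc' : 5 ≤ (cards7.map (fun x => x.2)).count c' := by simpa using List.find?_some ha
      have hmemc' : c' ∈ cards7.map (fun x => x.2) :=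
        (PySem.Set.mem_ofList _ _).mp (List.mem_of_find?_eq_some ha)
      have := List.find?_eq_none.mp hb c' (hpermc.mem_iff.mpr hmemc')
      rw [hqeq c'] at this
      simp [hqc'] at this
  · obtain ⟨c', ha, rfl⟩ := hfind c hb
    rw [hb, ha]
    exact (pv_max?_perm ((hperm.filter _).map _)).symm
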